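-- pv_equiv track=rewrite | github.com/faith-wm/Handling-brat-annotated-files | BRAT_2_XML.py | escape_lower_than_symbol
-- ===== SOURCE A (Python) =====
-- def escape_lower_than_symbol(html):
--     html_list = list(html)
--     for index in range(0, len(html) - 1):
--         if html_list[index] == '<' and html_list[index + 1] == '.':
--             html_list[index] = '&lt;'
--     for index in range(0, len(html) - 1):
--         if html_list[index] == '<' and html_list[index + 1] == 'or':
--                 html_list[index] = '&lt;'
--     for index in range(0, len(html) - 1):
--         if html_list[index] == '<' and html_list[index + 1] == ' ':
--             html_list[index] = '&lt;'
--     return ''.join(html_list)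
-- ===== SOURCE B (Python) =====
-- def escape_lower_than_symbol(html):
--     if not html:
--         return ''
--     out = [('&lt;' if c == '<' and nxt in ('.', ' ') else c)
--            for c, nxt in zip(html, html[1:])]
--     return ''.join(out + [html[-1]])
-- ===== Notes on version B (the rewrite author's own statement) =====
-- stated objective: idiomatic
-- what changed: Replaces three sequential in-place index-mutation passes over a character list (one of them dead: it compares a single character against a two-character string) with a single comprehension over zipped adjacent character pairs that emits the escaped entity where needed.
import Mathlib
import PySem

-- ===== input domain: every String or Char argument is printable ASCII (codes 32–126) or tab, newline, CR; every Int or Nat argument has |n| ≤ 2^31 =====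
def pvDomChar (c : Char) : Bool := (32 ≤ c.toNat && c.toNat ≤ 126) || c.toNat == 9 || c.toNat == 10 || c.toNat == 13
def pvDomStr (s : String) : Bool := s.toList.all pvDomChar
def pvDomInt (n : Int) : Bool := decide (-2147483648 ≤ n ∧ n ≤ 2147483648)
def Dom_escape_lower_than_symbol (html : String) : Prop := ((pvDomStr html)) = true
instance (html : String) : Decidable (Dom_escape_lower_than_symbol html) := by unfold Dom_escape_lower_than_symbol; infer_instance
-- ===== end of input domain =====

-- B replaces A's three index-mutation passes (one of them dead) by one zip-pairs comprehension (idiomatic; fewer passes).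

-- ===== PORT A =====
-- one mutation step of a pass: html_list[index] = '&lt;' when html_list[index] == '<' and html_list[index+1] == m
def pvStep (m : String) (l : List String) (i : Nat) : List String :=
  if l[i]? = some "<" ∧ l[i+1]? = some m then l.set i "&lt;" else l

def escape_lower_than_symbol (html : String) : String :=
  let html_list := html.toList.map (fun c => String.ofList [c])  -- list(html)
  let n := html.toList.length                                    -- len(html)
  let l1 := (List.range (n - 1)).foldl (pvStep ".") html_list    -- first for-loop
  let l2 := (List.range (n - 1)).foldl (pvStep "or") l1          -- second for-loop (compares a 1-char string to 'or')
  let l3 := (List.range (n - 1)).foldl (pvStep " ") l2           -- third for-loop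
  String.join l3                                                 -- ''.join(html_list)

-- ===== PORT B =====
def escape_lower_than_symbol_alt (html : String) : String :=
  let cs := html.toList
  if cs = [] then ""
  else
    let out := (cs.zip cs.tail).map
      (fun p => if p.1 = '<' ∧ (p.2 = '.' ∨ p.2 = ' ') then "&lt;" else String.ofList [p.1])
    String.join (out ++ [String.ofList [cs.getLast!]])

-- ===== PRECONDITION & SPEC =====
def Spec_escape_lower_than_symbol (html : String) (out : String) : Prop := out = escape_lower_than_symbol_alt html
instance (html : String) (out : String) : Decidable (Spec_escape_lower_than_symbol html out) := by unfold Spec_escape_lower_than_symbol; infer_instance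

-- ===== CLAIM (what is proved, stated in full; the proofs are below) =====
def Claim_equal_escape_lower_than_symbol : Prop := ∀ (html : String), Dom_escape_lower_than_symbol html → Spec_escape_lower_than_symbol html (escape_lower_than_symbol html)

-- ===== LEMMAS AND PROOFS =====

-- a pass as a pure pairwise map (spec form of one for-loop)
def pvPm (m : String) : List String → List String
  | [] => []
  | [s] => [s]
  | s :: t :: r => (if s = "<" ∧ t = m then "&lt;" else s) :: pvPm m (t :: r)

theorem pvStep_cons_succ (m : String) (c : String) (l : List String) (i : Nat) :
    pvStep m (c :: l) (i + 1) = c :: pvStep m l i := by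
  simp only [pvStep, List.getElem?_cons_succ, List.set_cons_succ]
  split_ifs <;> simp

theorem pvFoldl_shift (m : String) (c : String) (l : List String) (idxs : List Nat) :
    idxs.foldl (fun acc i => pvStep m acc (i + 1)) (c :: l)
      = c :: idxs.foldl (pvStep m) l := by
  induction idxs generalizing l with
  | nil => rfl
  | cons i t ih => simp only [List.foldl_cons, pvStep_cons_succ, ih]

theorem pvFold_eq_pm (m : String) (L : List String) :
    (List.range (L.length - 1)).foldl (pvStep m) L = pvPm m L := by
  match L with
  | [] => rfl
  | [s] => rfl
  | s :: t :: r =>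
    have hlen : (s :: t :: r).length - 1 = r.length + 1 := by simp
    rw [hlen, List.range_succ_eq_map, List.foldl_cons]
    have h0 : pvStep m (s :: t :: r) 0
        = (if s = "<" ∧ t = m then "&lt;" else s) :: t :: r := by
      by_cases hc : s = "<" ∧ t = m <;>
        simp [pvStep, hc]
    rw [h0, List.foldl_map, pvFoldl_shift]
    have := pvFold_eq_pm m (t :: r)
    simp only [List.length_cons, Nat.add_sub_cancel] at this
    rw [this, pvPm]

-- elements of a pm pass come from the input or are "&lt;"
theorem pvPm_mem (m : String) (L : List String) :
    ∀ s ∈ pvPm m L, s ∈ L ∨ s = "&lt;" := by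
  match L with
  | [] => simp [pvPm]
  | [s] => simp [pvPm]
  | s :: t :: r =>
    intro x hx
    rw [pvPm] at hx
    rcases List.mem_cons.mp hx with h | h
    · split_ifs at h
      · right; exact h
      · left; simp [h]
    · rcases pvPm_mem m (t :: r) x h with h' | h'
      · left; exact List.mem_cons_of_mem _ h'
      · right; exact h'

-- the 'or' pass is the identity when no element equals "or"
theorem pvPm_or_id (L : List String) (h : ∀ s ∈ L, s ≠ "or") :
    pvPm "or" L = L := by
  match L with
  | [] => rfl
  | [s] => rfl
  | s :: t :: r =>
    rw [pvPm]
    have ht : t ≠ "or" := h t (by simp)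
    rw [if_neg (fun hc => ht hc.2), pvPm_or_id (t :: r) (fun x hx => h x (List.mem_cons_of_mem _ hx))]

theorem pvSing_eq_lt (x : Char) : String.ofList [x] = "<" ↔ x = '<' := by
  rw [show ("<" : String) = String.ofList ['<'] from rfl, String.ofList_inj]; simp

theorem pvSing_eq_dot (x : Char) : String.ofList [x] = "." ↔ x = '.' := by
  rw [show ("." : String) = String.ofList ['.'] from rfl, String.ofList_inj]; simp

theorem pvSing_eq_space (x : Char) : String.ofList [x] = " " ↔ x = ' ' := by
  rw [show (" " : String) = String.ofList [' '] from rfl, String.ofList_inj]; simp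

theorem pvLt_ne_sing (c : Char) : ("&lt;" : String) ≠ String.ofList [c] := by
  intro h
  have h2 : ("&lt;" : String).toList.length = (String.ofList [c]).toList.length := by rw [h]
  simp at h2

theorem pvSing_ne_or (c : Char) : String.ofList [c] ≠ "or" := by
  intro h
  have := congrArg String.toList h
  simp at this

-- head of a dot pass on singleton-char strings
theorem pvPm_dot_head (b : Char) (r : List Char) :
    ∃ T, pvPm "." ((b :: r).map (fun c => String.ofList [c]))
      = (if b = '<' ∧ r.head? = some '.' then "&lt;" else String.ofList [b]) :: T := by
  match r with
  | [] => exact ⟨[], by simp [pvPm]⟩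
  | x :: r' =>
    refine ⟨pvPm "." ((x :: r').map (fun c => String.ofList [c])), ?_⟩
    simp only [List.map_cons, pvPm, List.head?_cons]
    congr 1
    by_cases hb : b = '<' <;> by_cases hx : x = '.' <;>
      simp [hb, hx, pvSing_eq_lt, pvSing_eq_dot, pvLt_ne_sing]

-- the combined result of the dot and space passes, pairwise over the chars
def pvComb : List Char → List String
  | [] => []
  | [c] => [String.ofList [c]]
  | c :: d :: r =>
      (if c = '<' ∧ (d = '.' ∨ d = ' ') then "&lt;" else String.ofList [c]) :: pvComb (d :: r)

theorem pvTwoPass (chars : List Char) :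
    pvPm " " (pvPm "." (chars.map (fun c => String.ofList [c]))) = pvComb chars := by
  match chars with
  | [] => rfl
  | [a] => rfl
  | a :: b :: r =>
    obtain ⟨T, hT⟩ := pvPm_dot_head b r
    simp only [List.map_cons]
    rw [show pvPm "." (String.ofList [a] :: String.ofList [b] :: r.map (fun c => String.ofList [c]))
        = (if String.ofList [a] = "<" ∧ String.ofList [b] = "." then "&lt;" else String.ofList [a])
          :: pvPm "." ((b :: r).map (fun c => String.ofList [c])) from by
      simp [pvPm]]
    rw [hT, pvPm]
    have hrec : pvPm " " ((if b = '<' ∧ r.head? = some '.' then "&lt;" else String.ofList [b]) :: T)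
        = pvComb (b :: r) := by
      rw [← hT, pvTwoPass (b :: r)]
    rw [hrec, pvComb]
    congr 1
    by_cases ha : a = '<' <;> by_cases hbd : b = '.' <;> by_cases hbs : b = ' ' <;>
      first
      | (exact absurd (hbd.symm.trans hbs) (by decide))
      | (by_cases hbl : b = '<' <;> by_cases hd : r.head? = some '.' <;>
          simp [ha, hbd, hbs, hbl, hd, pvSing_eq_lt, pvSing_eq_dot, pvSing_eq_space, pvLt_ne_sing,
            show ("&lt;" : String) ≠ "<" from by decide,
            show ("&lt;" : String) ≠ " " from by decide])

-- pvComb is exactly B's pieces: the zip-map plus the last character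
theorem pvComb_eq_zip (chars : List Char) (h : chars ≠ []) :
    pvComb chars
      = (chars.zip chars.tail).map
          (fun p => if p.1 = '<' ∧ (p.2 = '.' ∨ p.2 = ' ') then "&lt;" else String.ofList [p.1])
        ++ [String.ofList [chars.getLast!]] := by
  match chars with
  | [c] => simp [pvComb, List.getLast!]
  | c :: d :: r =>
    rw [pvComb, pvComb_eq_zip (d :: r) (by simp)]
    have hlast : (c :: d :: r).getLast! = (d :: r).getLast! := by
      unfold List.getLast!; simp
    rw [hlast]
    simp [List.zip]

theorem pvPm_length (m : String) (L : List String) : (pvPm m L).length = L.length := by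
  match L with
  | [] => rfl
  | [s] => rfl
  | s :: t :: r => rw [pvPm]; simp [pvPm_length m (t :: r)]

theorem pvPm_dot_no_or (chars : List Char) :
    ∀ s ∈ pvPm "." (chars.map (fun c => String.ofList [c])), s ≠ "or" := by
  intro s hs
  rcases pvPm_mem "." _ s hs with h | h
  · obtain ⟨c, _, rfl⟩ := List.mem_map.mp h
    exact pvSing_ne_or c
  · rw [h]; decide

-- ===== VERDICT (by name: the statement is the Claim_ definition above) =====
theorem escape_lower_than_symbol_spec : Claim_equal_escape_lower_than_symbol := by
  intro html _
  unfold Spec_escape_lower_than_symbol escape_lower_than_symbol escape_lower_than_symbol_alt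
  simp only
  by_cases h : html.toList = []
  · simp [h, pvPm, String.join]
  · rw [if_neg h]
    have hS : html.toList.length = (html.toList.map (fun c => String.ofList [c])).length := by simp
    rw [hS, pvFold_eq_pm]
    have h1 : (html.toList.map (fun c => String.ofList [c])).length
        = (pvPm "." (html.toList.map (fun c => String.ofList [c]))).length :=
      (pvPm_length "." _).symm
    rw [h1, pvFold_eq_pm, pvPm_or_id _ (pvPm_dot_no_or html.toList), pvFold_eq_pm,
        pvTwoPass, pvComb_eq_zip _ h]
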